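-- pv_equiv track=rewrite | github.com/gcordeirofm/CIFO25_42 | library/custom/cusotm_crossover.py | tag_solution
-- ===== SOURCE A (Python) =====
-- def tag_solution(solution_repr):
--     counts = {}
--     tagged_soln = []
--     for table in solution_repr:
--         if table not in counts:
--             counts[table] = 0 # setting first instance of each table to 0
--         tagged_soln.append((table, counts[table]))
--         counts[table] += 1
--     return tagged_soln
-- ===== SOURCE B (Python) =====
-- def tag_solution(solution_repr):
--     positions = {}
--     for i, table in enumerate(solution_repr):
--         positions.setdefault(table, []).append(i)
--     out = {}
--     for table, idxs in positions.items():
--         for rank, i in enumerate(idxs):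
--             out[i] = (table, rank)
--     return [out[i] for i in range(len(solution_repr))]
-- ===== Notes on version B (the rewrite author's own statement) =====
-- stated objective: alternative
-- what changed: Replaces A's single fused streaming pass (grow a counter dict while appending tags) by a group-by-value-then-scatter decomposition: first collect the index list of each distinct value, then scatter (value, rank) back to each index and read the result out in index order.
import Mathlib
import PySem

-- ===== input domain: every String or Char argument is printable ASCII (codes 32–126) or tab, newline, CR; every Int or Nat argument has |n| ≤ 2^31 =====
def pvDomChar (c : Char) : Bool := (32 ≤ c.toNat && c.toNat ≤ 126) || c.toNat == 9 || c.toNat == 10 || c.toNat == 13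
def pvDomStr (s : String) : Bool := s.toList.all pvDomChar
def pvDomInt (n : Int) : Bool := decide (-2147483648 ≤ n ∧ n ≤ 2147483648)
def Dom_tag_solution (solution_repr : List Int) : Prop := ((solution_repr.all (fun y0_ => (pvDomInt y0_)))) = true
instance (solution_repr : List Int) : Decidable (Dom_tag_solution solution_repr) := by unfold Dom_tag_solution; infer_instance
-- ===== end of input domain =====

-- B replaces A's single fused streaming pass (counter dict grown while appending) by a
-- group-by-value-then-scatter two-pass algorithm: group the indices of each value, then
-- scatter (value, rank) back to each index and read the result out in index order.

-- ===== PORT A =====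
-- one iteration of A's loop: state = (counts dict, tagged_soln accumulator)
def pvStepA (st : PySem.Dict Int Int × List (Int × Int)) (table : Int) :
    PySem.Dict Int Int × List (Int × Int) :=
  let counts := if st.1.contains table then st.1 else st.1.insert table 0
  (counts.insert table (counts.getD table 0 + 1), st.2 ++ [(table, counts.getD table 0)])

def tag_solution (solution_repr : List Int) : List (Int × Int) :=
  (solution_repr.foldl pvStepA (PySem.Dict.empty, [])).2

-- ===== PORT B =====
-- positions: for i, table in enumerate(...): positions.setdefault(table, []).append(i)
-- out: for table, idxs in positions.items(): for rank, i in enumerate(idxs): out[i] = (table, rank)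
-- return [out[i] for i in range(len(...))]   (out[i] is always present, so it never raises;
-- ported with getD whose default is unreachable)
def tag_solution_alt (solution_repr : List Int) : List (Int × Int) :=
  let positions : PySem.Dict Int (List Int) :=
    (PySem.List.enumerate solution_repr 0).foldl
      (fun d p => d.modify p.2 [] (· ++ [p.1])) PySem.Dict.empty
  let out : PySem.Dict Int (Int × Int) :=
    positions.items.foldl
      (fun d q => (PySem.List.enumerate q.2 0).foldl
        (fun d r => d.insert r.2 (q.1, r.1)) d) PySem.Dict.empty
  (PySem.List.pyRange 0 (solution_repr.length : Int) 1).map (fun i => out.getD i (0, 0))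

-- ===== PRECONDITION & SPEC =====
def Spec_tag_solution (solution_repr : List Int) (out : List (Int × Int)) : Prop := out = tag_solution_alt solution_repr
instance (solution_repr : List Int) (out : List (Int × Int)) : Decidable (Spec_tag_solution solution_repr out) := by unfold Spec_tag_solution; infer_instance

-- ===== CLAIM (what is proved, stated in full; the proofs are below) =====
def Claim_equal_tag_solution : Prop := ∀ (solution_repr : List Int), Dom_tag_solution solution_repr → Spec_tag_solution solution_repr (tag_solution solution_repr)

-- ===== LEMMAS AND PROOFS =====

-- the common reference form: each element tagged with its count in the prefix before it
def pvSpecTag (l : List Int) : List (Int × Int) :=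
  (PySem.List.enumerate l 0).map
    (fun p => (p.2, ((PySem.List.slice l none (some p.1)).count p.2 : Int)))

-- ---------- A-side: A's streaming pass equals pvSpecTag ----------

def pvBump (c : Int → Int) (x : Int) : Int → Int := fun y => if y = x then c y + 1 else c y

def pvFwdTag (c : Int → Int) : List Int → List (Int × Int)
  | [] => []
  | x :: xs => (x, c x) :: pvFwdTag (pvBump c x) xs

lemma foldA_eq (l : List Int) : ∀ (d : PySem.Dict Int Int) (acc : List (Int × Int)),
    (List.foldl pvStepA (d, acc) l).2 = acc ++ pvFwdTag (fun y => d.getD y 0) l := by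
  induction l with
  | nil => intro d acc; simp [pvFwdTag]
  | cons x xs ih =>
    intro d acc
    have hC : ∀ y, (if d.contains x then d else d.insert x 0).getD y 0 = d.getD y 0 := by
      intro y
      by_cases h : d.contains x = true
      · rw [if_pos h]
      · rw [if_neg h, PySem.Dict.getD_insert]
        split_ifs with hy
        · subst hy
          rw [PySem.Dict.getD_of_not_contains (h := by simpa using h)]
        · rfl
    have hstep : List.foldl pvStepA (d, acc) (x :: xs)
        = List.foldl pvStepA
            ((if d.contains x then d else d.insert x 0).insert x (d.getD x 0 + 1),
             acc ++ [(x, d.getD x 0)]) xs := by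
      simp only [List.foldl_cons, pvStepA, hC]
    rw [hstep, ih]
    have henv : (fun y => ((if d.contains x then d else d.insert x 0).insert x
        (d.getD x 0 + 1)).getD y 0) = pvBump (fun y => d.getD y 0) x := by
      funext y
      rw [PySem.Dict.getD_insert]
      simp only [pvBump]
      by_cases hy : y = x
      · rw [if_pos hy, if_pos hy]; subst hy; rfl
      · rw [if_neg hy, if_neg hy]; exact hC y
    rw [henv]
    simp [pvFwdTag]

lemma fwd_eq_prefix (suf : List Int) : ∀ (pre : List Int),
    pvFwdTag (fun y => ((pre.count y : Nat) : Int)) suf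
      = (PySem.List.enumerate suf (pre.length : Int)).map
          (fun p => (p.2, ((PySem.List.slice (pre ++ suf) none (some p.1)).count p.2 : Int))) := by
  induction suf with
  | nil => intro pre; simp [pvFwdTag, PySem.List.enumerate_nil]
  | cons x xs ih =>
    intro pre
    rw [PySem.List.enumerate_cons, List.map_cons]
    have hhead : PySem.List.slice (pre ++ [x] ++ xs) none (some (pre.length : Int)) = pre := by
      rw [PySem.List.slice_to_natCast]
      simp
    have hbump : pvBump (fun y => ((pre.count y : Nat) : Int)) x
        = fun y => (((pre ++ [x]).count y : Nat) : Int) := by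
      funext y
      simp only [pvBump, List.count_append, List.count_singleton, beq_iff_eq]
      by_cases hy : y = x
      · subst hy; simp
      · rw [if_neg hy, if_neg (fun h => hy h.symm)]
        simp
    have hlen : (pre.length : Int) + 1 = ((pre ++ [x]).length : Int) := by simp
    have hassoc : pre ++ x :: xs = (pre ++ [x]) ++ xs := by simp
    simp only [pvFwdTag, hbump, hlen, hassoc, hhead]
    rw [ih (pre ++ [x])]

lemma A_eq_spec (l : List Int) : tag_solution l = pvSpecTag l := by
  show (List.foldl pvStepA (PySem.Dict.empty, []) l).2 = pvSpecTag l
  rw [foldA_eq]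
  have hA : (fun y => (PySem.Dict.empty : PySem.Dict Int Int).getD y 0)
      = fun y => ((List.count y ([] : List Int) : Nat) : Int) := by
    funext y; simp [PySem.Dict.getD_empty]
  rw [hA]
  have h := fwd_eq_prefix l []
  simp only [List.nil_append, List.length_nil, Int.ofNat_zero] at h
  simpa [pvSpecTag] using h

-- ---------- B-side: the group/scatter passes equal pvSpecTag ----------

-- the index list of value v, in order
def pvGrp (l : List Int) (v : Int) : List Int :=
  ((PySem.List.enumerate l 0).filter (fun p => p.2 == v)).map (·.1)

def pvPositions (l : List Int) : PySem.Dict Int (List Int) :=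
  (PySem.List.enumerate l 0).foldl (fun d p => d.modify p.2 [] (· ++ [p.1])) PySem.Dict.empty

lemma positions_getD (l : List Int) (v : Int) : (pvPositions l).getD v [] = pvGrp l v := by
  show ((PySem.List.enumerate l 0).foldl
      (fun d p => d.modify p.2 [] (· ++ [p.1])) PySem.Dict.empty).getD v [] = pvGrp l v
  have hswap : (PySem.List.enumerate l 0).foldl
      (fun d p => d.modify p.2 [] (· ++ [p.1])) PySem.Dict.empty
      = ((PySem.List.enumerate l 0).map Prod.swap).foldl
          (fun d p => d.modify p.1 [] (· ++ [p.2])) PySem.Dict.empty := by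
    rw [List.foldl_map]
    rfl
  rw [hswap, PySem.Dict.getD_foldl_modify_append]
  simp [pvGrp, List.filter_map, Function.comp_def, PySem.Dict.getD_empty]

lemma positions_nodup_keys (l : List Int) : (pvPositions l).keys.Nodup := by
  exact PySem.Dict.nodup_keys_foldl_modify_key (PySem.List.enumerate l 0) (fun p => p.2) []
    (fun _ p => (· ++ [p.1])) PySem.Dict.empty PySem.Dict.nodup_keys_empty

-- a fold of inserts never touching key k leaves its lookup alone
lemma foldl_insert_get?_of_not_mem {ν : Type} (pairs : List (Int × ν)) (k : Int)
    (h : k ∉ pairs.map (·.1)) : ∀ (d : PySem.Dict Int ν),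
    (pairs.foldl (fun d p => d.insert p.1 p.2) d).get? k = d.get? k := by
  induction pairs with
  | nil => intro d; rfl
  | cons p rest ih =>
    intro d
    simp only [List.map_cons, List.mem_cons] at h
    push Not at h
    rw [List.foldl_cons, ih h.2, PySem.Dict.get?_insert, if_neg h.1]

-- with distinct keys, a fold of inserts looks up the unique pair
lemma foldl_insert_get?_of_mem {ν : Type} (pairs : List (Int × ν)) (k : Int) (w : ν)
    (hnd : (pairs.map (·.1)).Nodup) (hmem : (k, w) ∈ pairs) : ∀ (d : PySem.Dict Int ν),
    (pairs.foldl (fun d p => d.insert p.1 p.2) d).get? k = some w := by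
  induction pairs with
  | nil => cases hmem
  | cons p rest ih =>
    intro d
    simp only [List.map_cons, List.nodup_cons] at hnd
    rw [List.foldl_cons]
    rcases List.mem_cons.mp hmem with h | h
    · subst h
      have : k ∉ rest.map (·.1) := by simpa using hnd.1
      rw [foldl_insert_get?_of_not_mem rest k this, PySem.Dict.get?_insert_self]
    · exact ih hnd.2 h _

-- nested scatter loop = fold of inserts over the flattened pair list
lemma scatter_eq_flat (items : List (Int × List Int)) (d : PySem.Dict Int (Int × Int)) :
    items.foldl (fun d q => (PySem.List.enumerate q.2 0).foldl
        (fun d r => d.insert r.2 (q.1, r.1)) d) d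
      = (items.flatMap (fun q => (PySem.List.enumerate q.2 0).map (fun r => (r.2, (q.1, r.1))))).foldl
          (fun d p => d.insert p.1 p.2) d := by
  induction items generalizing d with
  | nil => rfl
  | cons q rest ih =>
    rw [List.foldl_cons, List.flatMap_cons, List.foldl_append, ih, List.foldl_map]

lemma mem_grp (l : List Int) (v j : Int) :
    j ∈ pvGrp l v ↔ ∃ (k : Nat) (h : k < l.length), j = (k : Int) ∧ l[k] = v := by
  simp only [pvGrp, List.mem_map, List.mem_filter, PySem.List.mem_enumerate_iff]
  constructor
  · rintro ⟨p, ⟨⟨k, hk, rfl⟩, hv⟩, rfl⟩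
    exact ⟨k, hk, by simp, by simpa using hv⟩
  · rintro ⟨k, hk, rfl, hv⟩
    exact ⟨((k : Int), l[k]), ⟨⟨k, hk, by simp⟩, by simpa using hv⟩, rfl⟩

lemma grp_length (l : List Int) (v : Int) : (pvGrp l v).length = l.count v := by
  have h : l.count v = ((PySem.List.enumerate l 0).map (·.2)).count v := by
    rw [PySem.List.map_snd_enumerate]
  rw [h, List.count_eq_countP, List.countP_map, pvGrp, List.length_map,
    ← List.countP_eq_length_filter]
  rfl

lemma grp_append (l : List Int) (x v : Int) :
    pvGrp (l ++ [x]) v = pvGrp l v ++ (if x = v then [(l.length : Int)] else []) := by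
  unfold pvGrp
  rw [PySem.List.enumerate_append, List.filter_append, List.map_append]
  congr 1
  rw [PySem.List.enumerate_cons, PySem.List.enumerate_nil, List.filter_cons]
  by_cases h : x = v
  · simp [h]
  · simp [h]

lemma grp_getElem? (l : List Int) : ∀ (k : Nat), ∀ (h : k < l.length),
    (pvGrp l l[k])[((l.take k).count l[k])]? = some (k : Int) := by
  induction l using List.reverseRecOn with
  | nil => intro k h; simp at h
  | append_singleton l x ih =>
    intro k hk
    rw [List.length_append, List.length_singleton] at hk
    by_cases h : k < l.length
    · have hget : (l ++ [x])[k] = l[k] := List.getElem_append_left h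
      have htake : (l ++ [x]).take k = l.take k := by
        rw [List.take_append_of_le_length (le_of_lt h)]
      rw [hget, htake, grp_append]
      have hidx : (l.take k).count l[k] < (pvGrp l l[k]).length := by
        rw [grp_length]
        have hsplit : (l.take k).count l[k] + (l.drop k).count l[k] = l.count l[k] := by
          rw [← List.count_append, List.take_append_drop]
        have hdrop : 0 < (l.drop k).count l[k] := by
          apply List.count_pos_iff.mpr
          rw [List.drop_eq_getElem_cons h]
          exact List.mem_cons_self
        omega
      rw [List.getElem?_append_left hidx]
      exact ih k h
    · have hk' : k = l.length := by omega
      subst hk'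
      have hget : (l ++ [x])[l.length] = x := by
        rw [List.getElem_append_right (le_refl _)]
        simp
      have htake : (l ++ [x]).take l.length = l := by
        rw [List.take_append_of_le_length (le_refl _), List.take_length]
      rw [hget, htake, grp_append, if_pos rfl]
      have hlen : l.count x = (pvGrp l x).length := (grp_length l x).symm
      rw [hlen, List.getElem?_append_right (le_refl _)]
      simp

lemma grp_pairwise (l : List Int) (v : Int) : (pvGrp l v).Pairwise (· < ·) := by
  have h := PySem.List.pairwise_lt_enumerate l 0
  exact List.Pairwise.map _ (fun a b hab => hab) (h.filter _)

lemma grp_nodup (l : List Int) (v : Int) : (pvGrp l v).Nodup := by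
  exact (grp_pairwise l v).nodup

-- the second pass's dict, as written in the port
def pvOut (l : List Int) : PySem.Dict Int (Int × Int) :=
  (pvPositions l).items.foldl
    (fun d q => (PySem.List.enumerate q.2 0).foldl
      (fun d r => d.insert r.2 (q.1, r.1)) d) PySem.Dict.empty

def pvFlat (l : List Int) : List (Int × (Int × Int)) :=
  (pvPositions l).items.flatMap
    (fun q => (PySem.List.enumerate q.2 0).map (fun r => (r.2, (q.1, r.1))))

lemma items_val (l : List Int) (v : Int) (idxs : List Int)
    (h : (v, idxs) ∈ (pvPositions l).items) : idxs = pvGrp l v := by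
  have hg : (pvPositions l).get? v = some idxs :=
    PySem.Dict.get?_of_mem_items _ h (positions_nodup_keys l)
  have := PySem.Dict.getD_of_get?_eq_some _ ([] : List Int) hg
  rw [positions_getD] at this
  exact this.symm

lemma flat_keys (l : List Int) :
    (pvFlat l).map (·.1) = (pvPositions l).items.flatMap (·.2) := by
  unfold pvFlat
  rw [List.map_flatMap]
  congr 1
  funext q
  rw [List.map_map]
  exact PySem.List.map_snd_enumerate q.2 0

lemma flat_keys_nodup (l : List Int) : ((pvFlat l).map (·.1)).Nodup := by
  rw [flat_keys, List.nodup_flatMap]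
  constructor
  · intro q hq
    rcases q with ⟨v, idxs⟩
    rw [items_val l v idxs hq]
    exact grp_nodup l v
  · have hkeys : ((pvPositions l).items.map (·.1)).Nodup := positions_nodup_keys l
    have hpw : (pvPositions l).items.Pairwise (fun a b => a.1 ≠ b.1) := by
      rw [List.nodup_iff_pairwise_ne, List.pairwise_map] at hkeys
      exact hkeys
    apply List.Pairwise.imp_of_mem (l := (pvPositions l).items)
      (R := fun a b => a.1 ≠ b.1) ?_ hpw
    intro a b ha hb hne
    rcases a with ⟨v, idxs⟩
    rcases b with ⟨v', idxs'⟩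
    rw [items_val l v idxs ha, items_val l v' idxs' hb]
    intro j hj hj'
    rcases (mem_grp l v j).mp hj with ⟨k, hk, rfl, hv⟩
    rcases (mem_grp l v' _).mp hj' with ⟨k', hk', hkk, hv'⟩
    have : k = k' := by exact_mod_cast hkk
    subst this
    exact hne (by simp [← hv, ← hv'])

lemma flat_mem (l : List Int) (k : Nat) (hk : k < l.length) :
    ((k : Int), (l[k], ((l.take k).count l[k] : Int))) ∈ pvFlat l := by
  have hvmem : l[k] ∈ (pvPositions l).keys := by
    have : (pvPositions l).keys = PySem.Set.ofList l := by
      show (pvPositions l).keys = _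
      unfold pvPositions
      have h1 := PySem.Dict.keys_foldl_modify_key (PySem.List.enumerate l 0) (fun p => p.2)
        ([] : List Int) (fun _ p => (· ++ [p.1])) PySem.Dict.empty
      rw [h1, PySem.List.map_snd_enumerate, PySem.Dict.keys_empty,
        PySem.Set.ofList_eq_foldl]
      rfl
    rw [this, PySem.Set.mem_ofList]
    exact List.getElem_mem hk
  have hcont : (pvPositions l).contains l[k] = true :=
    (PySem.Dict.contains_iff_mem_keys _ _).mpr hvmem
  obtain ⟨idxs, hg⟩ : ∃ idxs, (pvPositions l).get? l[k] = some idxs := by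
    have := PySem.Dict.contains_eq_isSome_get? (d := pvPositions l) (k := l[k])
    rw [hcont] at this
    exact Option.isSome_iff_exists.mp this.symm
  have hidxs : idxs = pvGrp l l[k] := by
    have := PySem.Dict.getD_of_get?_eq_some _ ([] : List Int) hg
    rw [positions_getD] at this
    exact this.symm
  have hitem : (l[k], idxs) ∈ (pvPositions l).items :=
    PySem.Dict.mem_items_of_get?_eq_some _ hg
  unfold pvFlat
  rw [List.mem_flatMap]
  refine ⟨(l[k], idxs), hitem, ?_⟩
  rw [List.mem_map]
  have hge := grp_getElem? l k hk
  rw [List.getElem?_eq_some_iff] at hge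
  obtain ⟨hm, hmk⟩ := hge
  refine ⟨(((l.take k).count l[k] : Int), (k : Int)), ?_, rfl⟩
  rw [PySem.List.mem_enumerate_iff]
  exact ⟨(l.take k).count l[k], by rw [hidxs]; exact hm, by simp [hidxs, hmk]⟩

lemma out_get? (l : List Int) (k : Nat) (hk : k < l.length) :
    (pvOut l).get? (k : Int) = some (l[k], ((l.take k).count l[k] : Int)) := by
  unfold pvOut
  rw [scatter_eq_flat]
  exact foldl_insert_get?_of_mem (pvFlat l) _ _ (flat_keys_nodup l) (flat_mem l k hk) _

lemma B_eq_spec (l : List Int) : tag_solution_alt l = pvSpecTag l := by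
  have halt : tag_solution_alt l
      = (PySem.List.pyRange 0 (l.length : Int) 1).map (fun i => (pvOut l).getD i (0, 0)) := rfl
  have hspec : pvSpecTag l
      = (PySem.List.pyRange 0 (l.length : Int) 1).map
          (fun j => (PySem.List.pyGetD l j 0,
            ((PySem.List.slice l none (some j)).count (PySem.List.pyGetD l j 0) : Int))) := by
    unfold pvSpecTag
    rw [PySem.List.enumerate_eq_map_pyRange l 0, List.map_map]
    rfl
  rw [halt, hspec]
  apply List.map_congr_left
  intro j hj
  rw [PySem.List.mem_pyRange_one] at hj
  obtain ⟨k, rfl⟩ : ∃ k : Nat, j = (k : Int) := ⟨j.toNat, (Int.toNat_of_nonneg hj.1).symm⟩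
  have hk : k < l.length := by exact_mod_cast hj.2
  have hout := out_get? l k hk
  rw [PySem.Dict.getD_of_get?_eq_some _ (0, 0) hout]
  rw [PySem.List.slice_to_natCast]
  have hget : PySem.List.pyGetD l (k : Int) 0 = l[k] := by
    rw [PySem.List.pyGetD_of_nonneg l 0 (by positivity)]
    have htn : ((k : Int)).toNat = k := Int.toNat_natCast k
    rw [htn, List.getD_eq_getElem?_getD, List.getElem?_eq_getElem hk]
    rfl
  rw [hget]

-- ===== VERDICT (by name: the statement is the Claim_ definition above) =====
theorem tag_solution_spec : Claim_equal_tag_solution := by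
  intro l _
  show tag_solution l = tag_solution_alt l
  rw [A_eq_spec, B_eq_spec]
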